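-- pv_equiv track=rewrite | github.com/05030522/appod | ct/ct06/ct06_10.py | solution
-- ===== SOURCE A (Python) =====
-- def solution(n, lost, reserve):
--     # set으로 변환하여 중복 제거 및 차집합 연산 수행
--     real_lost = set(lost) - set(reserve)
--     real_reserve = set(reserve) - set(lost)
--     for r in sorted(list(real_reserve)):
--         if r - 1 in real_lost: # 앞번호 학생에게 빌려줄 수 있는 경우
--             real_lost.remove(r - 1)
--         elif r + 1 in real_lost: # 뒷번호 학생에게 빌려줄 수 있는 경우
--             real_lost.remove(r + 1)
--
--     return n - len(real_lost)
-- ===== SOURCE B (Python) =====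
-- def solution(n, lost, reserve):
--     # Two-pointer merge over the two sorted disjoint groups instead of
--     # mutating a set while scanning sorted reserves.
--     Ls = sorted(set(lost) - set(reserve))
--     Rs = sorted(set(reserve) - set(lost))
--     i = j = pairs = 0
--     while i < len(Ls) and j < len(Rs):
--         if abs(Ls[i] - Rs[j]) == 1:
--             pairs += 1
--             i += 1
--             j += 1
--         elif Ls[i] < Rs[j]:
--             i += 1
--         else:
--             j += 1
--     return n - len(Ls) + pairs
-- ===== Notes on version B (the rewrite author's own statement) =====
-- stated objective: alternative
-- what changed: Replaces A's greedy that scans sorted reserves while destructively removing neighbours from a mutable lost-set by a recursive two-pointer merge of the two sorted disjoint groups that counts matchable adjacent pairs directly, with no mutable set.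
import Mathlib
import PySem

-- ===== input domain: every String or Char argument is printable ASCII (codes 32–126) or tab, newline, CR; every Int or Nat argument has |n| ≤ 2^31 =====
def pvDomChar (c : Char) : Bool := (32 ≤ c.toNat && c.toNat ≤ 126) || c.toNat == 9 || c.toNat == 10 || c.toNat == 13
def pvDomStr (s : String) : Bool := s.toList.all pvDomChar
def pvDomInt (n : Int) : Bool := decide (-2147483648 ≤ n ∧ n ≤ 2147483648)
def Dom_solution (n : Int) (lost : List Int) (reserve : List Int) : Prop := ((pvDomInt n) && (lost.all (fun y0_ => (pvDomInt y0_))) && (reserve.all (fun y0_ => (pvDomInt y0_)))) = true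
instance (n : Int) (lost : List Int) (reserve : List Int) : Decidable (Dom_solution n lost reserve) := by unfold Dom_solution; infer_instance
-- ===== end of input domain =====

-- ===== PORT A =====
-- B replaces A's mutable-set greedy over sorted reserves by a two-pointer merge of the two sorted groups (alternative decomposition, same cost).
def solution (n : Int) (lost : List Int) (reserve : List Int) : Int :=
  let realLost : PySem.Set Int := PySem.Set.diff (PySem.Set.ofList lost) (PySem.Set.ofList reserve)
  let realReserve : PySem.Set Int := PySem.Set.diff (PySem.Set.ofList reserve) (PySem.Set.ofList lost)
  let finalLost :=
    (PySem.List.sorted realReserve (fun x => x) false).foldl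
      (fun s r =>
        if PySem.Set.contains s (r - 1) then ((PySem.Set.remove? s (r - 1)).getD s)
        else if PySem.Set.contains s (r + 1) then ((PySem.Set.remove? s (r + 1)).getD s)
        else s)
      realLost
  n - PySem.Set.len finalLost

-- ===== PORT B =====
-- Source B's two-pointer while loop, transliterated: state (i, j, pairs); the fuel
-- argument only makes the recursion structural (it is never exhausted when the
-- loop is entered with enough fuel, as solution_alt supplies)
def solutionLoop (Ls Rs : List Int) : Nat → Nat → Nat → Int → Int
  | 0, _, _, pairs => pairs
  | fuel + 1, i, j, pairs =>
    if hi : i < Ls.length then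
      if hj : j < Rs.length then
        if ((Ls[i]'hi) - (Rs[j]'hj)).natAbs = 1 then solutionLoop Ls Rs fuel (i + 1) (j + 1) (pairs + 1)
        else if (Ls[i]'hi) < (Rs[j]'hj) then solutionLoop Ls Rs fuel (i + 1) j pairs
        else solutionLoop Ls Rs fuel i (j + 1) pairs
      else pairs
    else pairs

def solution_alt (n : Int) (lost : List Int) (reserve : List Int) : Int :=
  let Ls := PySem.List.sorted (PySem.Set.diff (PySem.Set.ofList lost) (PySem.Set.ofList reserve)) (fun x => x) false
  let Rs := PySem.List.sorted (PySem.Set.diff (PySem.Set.ofList reserve) (PySem.Set.ofList lost)) (fun x => x) false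
  n - Ls.length + solutionLoop Ls Rs (Ls.length + Rs.length + 1) 0 0 0

-- ===== PRECONDITION & SPEC =====
def Spec_solution (n : Int) (lost : List Int) (reserve : List Int) (out : Int) : Prop := out = solution_alt n lost reserve
instance (n : Int) (lost : List Int) (reserve : List Int) (out : Int) : Decidable (Spec_solution n lost reserve out) := by unfold Spec_solution; infer_instance

-- ===== CLAIM (what is proved, stated in full; the proofs are below) =====
def Claim_equal_solution : Prop := ∀ (n : Int) (lost : List Int) (reserve : List Int), Dom_solution n lost reserve → Spec_solution n lost reserve (solution n lost reserve)

-- ===== LEMMAS AND PROOFS =====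

-- list-structured view of Source B's two-pointer loop, used by the induction
def solutionPairs : List Int → List Int → Int
  | [], _ => 0
  | _ :: _, [] => 0
  | l :: L', r :: R' =>
    if (l - r).natAbs = 1 then 1 + solutionPairs L' R'
    else if l < r then solutionPairs L' (r :: R')
    else solutionPairs (l :: L') R'
  termination_by L R => L.length + R.length

lemma solutionLoop_eq_pairs (Ls Rs : List Int) : ∀ (fuel i j : Nat) (p : Int),
    (Ls.length - i) + (Rs.length - j) < fuel →
    solutionLoop Ls Rs fuel i j p = p + solutionPairs (Ls.drop i) (Rs.drop j)
  | 0, i, j, p => by omega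
  | fuel + 1, i, j, p => by
    intro hfuel
    rw [solutionLoop]
    by_cases hi : i < Ls.length
    · rw [dif_pos hi]
      by_cases hj : j < Rs.length
      · rw [dif_pos hj, List.drop_eq_getElem_cons hi, List.drop_eq_getElem_cons hj,
          solutionPairs]
        by_cases h1 : (Ls[i] - Rs[j]).natAbs = 1
        · rw [if_pos h1, if_pos h1,
            solutionLoop_eq_pairs Ls Rs fuel (i + 1) (j + 1) (p + 1) (by omega)]
          ring
        · rw [if_neg h1, if_neg h1]
          by_cases h2 : Ls[i] < Rs[j]
          · rw [if_pos h2, if_pos h2,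
              solutionLoop_eq_pairs Ls Rs fuel (i + 1) j p (by omega),
              List.drop_eq_getElem_cons hj]
          · rw [if_neg h2, if_neg h2,
              solutionLoop_eq_pairs Ls Rs fuel i (j + 1) p (by omega),
              List.drop_eq_getElem_cons hi]
      · rw [dif_neg hj]
        rw [List.drop_of_length_le (by omega : Rs.length ≤ j)]
        cases Ls.drop i <;> simp [solutionPairs]
    · rw [dif_neg hi]
      rw [List.drop_of_length_le (by omega : Ls.length ≤ i)]
      simp [solutionPairs]

-- A's loop body, named for the proofs
def solStep (s : PySem.Set Int) (r : Int) : PySem.Set Int :=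
  if PySem.Set.contains s (r - 1) then ((PySem.Set.remove? s (r - 1)).getD s)
  else if PySem.Set.contains s (r + 1) then ((PySem.Set.remove? s (r + 1)).getD s)
  else s

lemma filter_bne_eq_erase (s : List Int) (hnd : s.Nodup) (a : Int) :
    List.filter (fun y => !y == a) s = s.erase a := by
  rw [List.Nodup.erase_eq_filter hnd a]
  apply List.filter_congr
  intro x _
  simp [bne]

lemma solStep_eq (s : List Int) (hnd : s.Nodup) (r : Int) :
    solStep s r =
      if (r - 1) ∈ s then s.erase (r - 1)
      else if (r + 1) ∈ s then s.erase (r + 1)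
      else s := by
  simp only [solStep, PySem.Set.contains, PySem.Set.remove?, PySem.Set.discard,
    List.contains_iff_mem]
  split_ifs with h1 h2 <;> simp [*, filter_bne_eq_erase s hnd]

theorem solMain : ∀ (R L junk S : List Int),
    S.Perm (junk ++ L) → S.Nodup →
    L.Pairwise (· < ·) → R.Pairwise (· < ·) →
    (∀ x ∈ L, x ∉ R) →
    (∀ j ∈ junk, ∀ r ∈ R, j < r - 1) →
    ((R.foldl solStep S).length : Int) = (S.length : Int) - solutionPairs L R
  | [], L, junk, S => by
    intro _ _ _ _ _ _
    cases L <;> simp [solutionPairs]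
  | r :: R', [], junk, S => by
    intro hS hnd _ hR hdisj hjunk
    have hmemS : ∀ x, x ∈ S ↔ x ∈ junk := by
      intro x; rw [hS.mem_iff]; simp
    have hstep : solStep S r = S := by
      rw [solStep_eq S hnd r]
      have h1 : (r - 1) ∉ S := by
        rw [hmemS]; intro h; have := hjunk _ h r (by simp); omega
      have h2 : (r + 1) ∉ S := by
        rw [hmemS]; intro h; have := hjunk _ h r (by simp); omega
      simp [h1, h2]
    rw [List.foldl_cons, hstep]
    have := solMain R' [] junk S hS hnd (by simp) (hR.of_cons) (by simp)
      (fun j hj r' hr' => hjunk j hj r' (by simp [hr']))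
    simpa [solutionPairs] using this
  | r :: R', l :: L', junk, S => by
    intro hS hnd hL hR hdisj hjunk
    have hndJL : (junk ++ l :: L').Nodup := (hS.nodup_iff).mp hnd
    have hlj : l ∉ junk := by
      intro h
      exact (List.disjoint_of_nodup_append hndJL) h (by simp)
    have hlS : l ∈ S := hS.mem_iff.mpr (by simp)
    have hLgt : ∀ x ∈ L', l < x := by
      intro x hx; exact (List.pairwise_cons.mp hL).1 x hx
    have hRgt : ∀ x ∈ R', r < x := by
      intro x hx; exact (List.pairwise_cons.mp hR).1 x hx
    have hlr : l ≠ r := fun h => hdisj l (by simp) (by simp [h])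
    have hmemS : ∀ x, x ∈ S ↔ x ∈ junk ∨ x = l ∨ x ∈ L' := by
      intro x; rw [hS.mem_iff]; simp
    -- the erase case, shared by the two adjacency branches
    have herase : S.erase l |>.Perm (junk ++ L') := by
      have := hS.erase l
      rwa [List.erase_append_right _ hlj, List.erase_cons_head] at this
    by_cases hadj1 : l = r - 1
    · -- A lends to the front neighbour: r - 1 = l ∈ S
      have hstep : solStep S r = S.erase l := by
        rw [solStep_eq S hnd r]; simp [← hadj1, hlS]
      rw [List.foldl_cons, hstep]
      have hrec := solMain R' L' junk (S.erase l) herase (hnd.erase l)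
        (hL.of_cons) (hR.of_cons)
        (fun x hx hxR => hdisj x (by simp [hx]) (by simp [hxR]))
        (fun j hj r' hr' => by have := hjunk j hj r (by simp); have := hRgt r' hr'; omega)
      have hlen : (S.erase l).length = S.length - 1 := List.length_erase_of_mem hlS
      have hpos : 1 ≤ S.length := List.length_pos_of_mem hlS
      have hpair : solutionPairs (l :: L') (r :: R') = 1 + solutionPairs L' R' := by
        rw [solutionPairs]; rw [if_pos (by omega)]
      rw [hpair, hrec, hlen]
      push_cast [hlen, Nat.cast_sub hpos]
      ring
    · by_cases hadj2 : l = r + 1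
      · -- A lends to the back neighbour: r - 1 ∉ S, r + 1 = l ∈ S
        have h1 : (r - 1) ∉ S := by
          rw [hmemS]; rintro (h | h | h)
          · have := hjunk _ h r (by simp); omega
          · omega
          · have := hLgt _ h; omega
        have hstep : solStep S r = S.erase l := by
          rw [solStep_eq S hnd r]; simp [h1, ← hadj2, hlS]
        rw [List.foldl_cons, hstep]
        have hrec := solMain R' L' junk (S.erase l) herase (hnd.erase l)
          (hL.of_cons) (hR.of_cons)
          (fun x hx hxR => hdisj x (by simp [hx]) (by simp [hxR]))
          (fun j hj r' hr' => by have := hjunk j hj r (by simp); have := hRgt r' hr'; omega)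
        have hlen : (S.erase l).length = S.length - 1 := List.length_erase_of_mem hlS
        have hpos : 1 ≤ S.length := List.length_pos_of_mem hlS
        have hpair : solutionPairs (l :: L') (r :: R') = 1 + solutionPairs L' R' := by
          rw [solutionPairs]; rw [if_pos (by omega)]
        rw [hpair, hrec, hlen]
        push_cast [hlen, Nat.cast_sub hpos]
        ring
      · by_cases hlt : l < r
        · -- l ≤ r - 2: l can never be lent to; move it to the junk
          have hrec := solMain (r :: R') L' (junk ++ [l]) S
            (by simpa using hS) hnd (hL.of_cons) hR
            (fun x hx hxR => hdisj x (by simp [hx]) hxR)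
            (by
              intro j hj r' hr'
              rcases List.mem_append.mp hj with h | h
              · exact hjunk j h r' hr'
              · have hj' : j = l := by simpa using h
                subst hj'
                rcases List.mem_cons.mp hr' with h' | h'
                · omega
                · have := hRgt r' h'; omega)
          have hpair : solutionPairs (l :: L') (r :: R') = solutionPairs L' (r :: R') := by
            rw [solutionPairs]; rw [if_neg (by omega), if_pos hlt]
          rw [hpair]; exact hrec
        · -- r ≤ l - 2: this reserve lends to nobody
          have hstep : solStep S r = S := by
            rw [solStep_eq S hnd r]
            have h1 : (r - 1) ∉ S := by
              rw [hmemS]; rintro (h | h | h)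
              · have := hjunk _ h r (by simp); omega
              · omega
              · have := hLgt _ h; omega
            have h2 : (r + 1) ∉ S := by
              rw [hmemS]; rintro (h | h | h)
              · have := hjunk _ h r (by simp); omega
              · omega
              · have := hLgt _ h; omega
            simp [h1, h2]
          rw [List.foldl_cons, hstep]
          have hrec := solMain R' (l :: L') junk S hS hnd hL (hR.of_cons)
            (fun x hx hxR => hdisj x hx (by simp [hxR]))
            (fun j hj r' hr' => by have := hjunk j hj r (by simp); have := hRgt r' hr'; omega)
          have hpair : solutionPairs (l :: L') (r :: R') = solutionPairs (l :: L') R' := by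
            rw [solutionPairs]; rw [if_neg (by omega), if_neg hlt]
          rw [hpair]; exact hrec
  termination_by R L _ _ => L.length + R.length

lemma sorted_nodup_pairwise_lt (xs : List Int) (h : xs.Nodup) :
    (PySem.List.sorted xs (fun x => x) false).Pairwise (· < ·) := by
  have h1 := PySem.List.sorted_pairwise xs (fun x => x)
  have h2 : (PySem.List.sorted xs (fun x => x) false).Nodup :=
    (PySem.List.sorted_perm xs (fun x => x) false).nodup_iff.mpr h
  have := h1.and h2
  exact this.imp (fun {a b} hab => lt_of_le_of_ne hab.1 hab.2)



theorem solution_eq_alt (n : Int) (lost : List Int) (reserve : List Int) :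
    solution n lost reserve = solution_alt n lost reserve := by
  simp only [solution, solution_alt]
  set Dl := PySem.Set.diff (PySem.Set.ofList lost) (PySem.Set.ofList reserve) with hDl
  set Dr := PySem.Set.diff (PySem.Set.ofList reserve) (PySem.Set.ofList lost) with hDr
  have hndDl : Dl.Nodup := (PySem.Set.nodup_ofList lost).filter _
  have hndDr : Dr.Nodup := (PySem.Set.nodup_ofList reserve).filter _
  set Ls := PySem.List.sorted Dl (fun x => x) false with hLs
  set Rs := PySem.List.sorted Dr (fun x => x) false with hRs
  have hpermL : Dl.Perm ([] ++ Ls) := by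
    simpa using (PySem.List.sorted_perm Dl (fun x => x) false).symm
  have hdisj : ∀ x ∈ Ls, x ∉ Rs := by
    intro x hx hxR
    have h1 : x ∈ Dl := (PySem.List.sorted_perm Dl (fun x => x) false).mem_iff.mp hx
    have h2 : x ∈ Dr := (PySem.List.sorted_perm Dr (fun x => x) false).mem_iff.mp hxR
    rw [hDl, PySem.Set.mem_diff] at h1
    rw [hDr, PySem.Set.mem_diff] at h2
    exact h1.2 h2.1
  have key := solMain Rs Ls [] Dl hpermL hndDl
    (sorted_nodup_pairwise_lt Dl hndDl) (sorted_nodup_pairwise_lt Dr hndDr)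
    hdisj (by simp)
  have hstep : (fun (s : PySem.Set Int) (r : Int) =>
        if PySem.Set.contains s (r - 1) then ((PySem.Set.remove? s (r - 1)).getD s)
        else if PySem.Set.contains s (r + 1) then ((PySem.Set.remove? s (r + 1)).getD s)
        else s) = solStep := rfl
  rw [hstep]
  have hlen : Dl.length = Ls.length := hpermL.length_eq.trans (by simp)
  simp only [PySem.Set.len]
  rw [key, hlen, solutionLoop_eq_pairs Ls Rs (Ls.length + Rs.length + 1) 0 0 0 (by omega)]
  simp
  ring

-- ===== VERDICT (by name: the statement is the Claim_ definition above) =====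
theorem solution_spec : Claim_equal_solution := by
  intro n lost reserve _
  exact solution_eq_alt n lost reserve
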